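-- pv_equiv track=rewrite | github.com/UKPLab/iclr2025-obscura-coder | ObscuraCoder/Obfuscator/obfs/tree_sitter_utils.py | byte_offset_to_position
-- ===== SOURCE A (Python) =====
-- def byte_offset_to_position(text, byte_offset):
--     current_byte = 0
--     lines = text.splitlines(keepends=True)
--
--     for line_number, line in enumerate(lines):
--         next_byte = current_byte + len(line.encode('utf-8'))
--
--         if next_byte > byte_offset:
--             column = byte_offset - current_byte
--             return (line_number, column)
--
--         current_byte = next_byte
--
--     if current_byte == byte_offset:
--         return (len(lines), 0)
--
--     raise ValueError("Byte offset is out of range")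
-- ===== SOURCE B (Python) =====
-- def byte_offset_to_position(text, byte_offset):
--     lines = text.splitlines(keepends=True)
--     # prefix array of cumulative byte counts after each line
--     ends = []
--     total = 0
--     for line in lines:
--         total += len(line.encode('utf-8'))
--         ends.append(total)
--     # hand-rolled bisect_right: first index whose cumulative end exceeds byte_offset
--     lo, hi = 0, len(ends)
--     while lo < hi:
--         mid = (lo + hi) // 2
--         if ends[mid] <= byte_offset:
--             lo = mid + 1
--         else:
--             hi = mid
--     if lo < len(lines):
--         start = ends[lo - 1] if lo else 0
--         return (lo, byte_offset - start)
--     if byte_offset == total: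
--         return (len(lines), 0)
--     raise ValueError("Byte offset is out of range")
-- ===== Notes on version B (the rewrite author's own statement) =====
-- stated objective: alternative
-- what changed: A's single enumerate-loop carrying a running byte counter is replaced by building a prefix array of cumulative per-line UTF-8 byte counts and locating the line with a hand-rolled bisect_right binary search.
import Mathlib
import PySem

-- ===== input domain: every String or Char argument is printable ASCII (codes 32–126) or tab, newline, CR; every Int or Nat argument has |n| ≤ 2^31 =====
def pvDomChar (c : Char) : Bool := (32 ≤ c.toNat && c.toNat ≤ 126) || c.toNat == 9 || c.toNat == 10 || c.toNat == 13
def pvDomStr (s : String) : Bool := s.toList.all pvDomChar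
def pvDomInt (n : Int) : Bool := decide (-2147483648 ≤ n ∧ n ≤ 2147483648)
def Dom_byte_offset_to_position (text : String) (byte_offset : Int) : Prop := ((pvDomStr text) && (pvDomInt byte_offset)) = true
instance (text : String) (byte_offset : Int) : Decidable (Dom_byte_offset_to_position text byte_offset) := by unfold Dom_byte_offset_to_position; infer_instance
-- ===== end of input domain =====

-- B replaces A's single scan by a prefix array of cumulative byte counts plus a binary search
-- (hand-rolled bisect_right); alternative decomposition, not claimed faster.


-- ===== PORT A =====
-- Python's str.splitlines(keepends=True); exact on Dom's character set (printable ASCII,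
-- tab, '\n', '\r'), where line breaks are exactly '\n', '\r' and '\r\n'.
def splitKeep : List Char → List (List Char)
  | [] => []
  | '\n' :: rest => ['\n'] :: splitKeep rest
  | '\r' :: '\n' :: rest => ['\r', '\n'] :: splitKeep rest
  | '\r' :: rest => ['\r'] :: splitKeep rest
  | c :: rest =>
    match splitKeep rest with
    | [] => [[c]]
    | l :: ls => (c :: l) :: ls

-- A's for-loop over enumerate(lines) with current_byte; on Dom all chars are ASCII so
-- len(line.encode('utf-8')) is the char count.  (-1, -1) stands for the ValueError path,
-- which Pre_ excludes.
def loopA : List (List Char) → Int → Int → Int → Int × Int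
  | [], line_number, current_byte, byte_offset =>
    if current_byte = byte_offset then (line_number, 0) else (-1, -1)
  | line :: ls, line_number, current_byte, byte_offset =>
    let next_byte := current_byte + (line.length : Int)
    if next_byte > byte_offset then (line_number, byte_offset - current_byte)
    else loopA ls (line_number + 1) next_byte byte_offset

def byte_offset_to_position (text : String) (byte_offset : Int) : Int × Int :=
  loopA (splitKeep text.toList) 0 0 byte_offset

-- ===== PORT B =====
-- B's prefix array of cumulative byte counts (ASCII: char counts) after each line.
def endsOf (current : Int) : List (List Char) → List Int
  | [] => []
  | l :: ls => (current + (l.length : Int)) :: endsOf (current + (l.length : Int)) ls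

-- B's hand-rolled bisect_right loop.
def bsearch (ends : List Int) (byte_offset : Int) (lo hi : Nat) : Nat :=
  if _h : lo < hi then
    let mid := (lo + hi) / 2
    if ends.getD mid 0 ≤ byte_offset then bsearch ends byte_offset (mid + 1) hi
    else bsearch ends byte_offset lo mid
  else lo
termination_by hi - lo
decreasing_by all_goals omega

-- (-1, -2) stands for B's ValueError path, excluded by Pre_.
def byte_offset_to_position_alt (text : String) (byte_offset : Int) : Int × Int :=
  let lines := splitKeep text.toList
  let ends := endsOf 0 lines
  let lo := bsearch ends byte_offset 0 ends.length
  if lo < lines.length then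
    ((lo : Int), byte_offset - (if lo = 0 then 0 else ends.getD (lo - 1) 0))
  else if byte_offset = ends.getLastD 0 then ((lines.length : Int), 0)
  else (-1, -2)

-- ===== PRECONDITION & SPEC =====
-- UTF-8 byte count of a character / string (Python's len(text.encode('utf-8'))),
-- used only to state Pre_ exactly in terms of bytes, as A measures.
def charBytes (c : Char) : Int :=
  if c.toNat < 128 then 1 else if c.toNat < 2048 then 2 else if c.toNat < 65536 then 3 else 4
def byteLen (cs : List Char) : Int := (cs.map charBytes).sum

-- Pre_ excludes exactly the inputs on which the Python A raises ValueError: byte_offset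
-- beyond the total UTF-8 byte length of text, or any nonzero offset on empty text;
-- B raises there too.
def Pre_byte_offset_to_position (text : String) (byte_offset : Int) : Prop :=
  (text ≠ "" ∧ byte_offset < byteLen text.toList) ∨ byte_offset = byteLen text.toList
instance (text : String) (byte_offset : Int) : Decidable (Pre_byte_offset_to_position text byte_offset) := by
  unfold Pre_byte_offset_to_position; infer_instance

def pvWitness_byte_offset_to_position : String × Int := ("ab\ncd", 4)

def Spec_byte_offset_to_position (text : String) (byte_offset : Int) (out : Int × Int) : Prop := out = byte_offset_to_position_alt text byte_offset
instance (text : String) (byte_offset : Int) (out : Int × Int) : Decidable (Spec_byte_offset_to_position text byte_offset out) := by unfold Spec_byte_offset_to_position; infer_instance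

-- ===== CLAIM (what is proved, stated in full; the proofs are below) =====
def Claim_equal_byte_offset_to_position : Prop := ∀ (text : String) (byte_offset : Int), Dom_byte_offset_to_position text byte_offset → Pre_byte_offset_to_position text byte_offset → Spec_byte_offset_to_position text byte_offset (byte_offset_to_position text byte_offset)

-- ===== LEMMAS AND PROOFS =====

-- on Dom every character is ASCII, so the UTF-8 byte length is the character count.
theorem byteLen_eq_length (cs : List Char) (h : cs.all pvDomChar = true) :
    byteLen cs = (cs.length : Int) := by
  induction cs with
  | nil => rfl
  | cons c cs ih =>
    simp only [List.all_cons, Bool.and_eq_true] at h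
    have hc : c.toNat < 128 := by
      have := h.1
      simp only [pvDomChar, Bool.or_eq_true, Bool.and_eq_true, decide_eq_true_eq,
        beq_iff_eq] at this
      omega
    simp only [byteLen, List.map_cons, List.sum_cons, charBytes, hc, if_pos, List.length_cons]
    have := ih h.2
    simp only [byteLen] at this
    rw [this]; push_cast; ring

-- splitKeep reassembles to the original character list.
theorem splitKeep_flatten (cs : List Char) : (splitKeep cs).flatten = cs := by
  fun_induction splitKeep cs <;> simp_all

theorem splitKeep_ne_nil (cs : List Char) (l : List Char) (hl : l ∈ splitKeep cs) : l ≠ [] := by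
  fun_induction splitKeep cs generalizing l <;> simp_all [List.mem_cons] <;>
    rcases hl with h | h <;> simp_all

theorem mem_endsOf_gt (ls : List (List Char)) : ∀ (c x : Int),
    (∀ l ∈ ls, l ≠ []) → x ∈ endsOf c ls → c < x := by
  induction ls with
  | nil => intro c x _ hx; simp [endsOf] at hx
  | cons l ls ih =>
    intro c x hne hx
    have hlpos : 0 < (l.length : Int) := by
      have := hne l (by simp)
      have : l.length ≠ 0 := by simpa [List.length_eq_zero_iff] using this
      omega
    simp only [endsOf, List.mem_cons] at hx
    rcases hx with h | h
    · omega
    · have := ih (c + l.length) x (fun m hm => hne m (List.mem_cons_of_mem _ hm)) h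
      omega

theorem endsOf_length (ls : List (List Char)) : ∀ c, (endsOf c ls).length = ls.length := by
  induction ls with
  | nil => intro c; rfl
  | cons l ls ih => intro c; simp [endsOf, ih]

theorem endsOf_getLastD (ls : List (List Char)) : ∀ c,
    (endsOf c ls).getLastD c = c + ((ls.map List.length).sum : Int) := by
  induction ls with
  | nil => intro c; simp [endsOf]
  | cons l ls ih =>
    intro c
    simp only [endsOf, List.getLastD_cons, ih, List.map_cons, List.sum_cons]
    push_cast; ring

-- the cumulative ends are increasing, so (· ≤ off) holds exactly on the countP-prefix.
theorem endsOf_le_iff (ls : List (List Char)) : ∀ (c off : Int),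
    (∀ l ∈ ls, l ≠ []) → ∀ i, i < (endsOf c ls).length →
    (((endsOf c ls).getD i 0 ≤ off) ↔ i < (endsOf c ls).countP (fun e => decide (e ≤ off))) := by
  induction ls with
  | nil => intro c off _ i hi; simp [endsOf] at hi
  | cons l ls ih =>
    intro c off hne i hi
    have htail : ∀ l' ∈ ls, l' ≠ [] := fun m hm => hne m (List.mem_cons_of_mem _ hm)
    simp only [endsOf] at hi ⊢
    set e := c + (l.length : Int) with he
    by_cases hle : e ≤ off
    · rw [List.countP_cons_of_pos (by simpa using hle)]
      cases i with
      | zero =>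
        simp only [List.getD_cons_zero]
        exact ⟨fun _ => by omega, fun _ => hle⟩
      | succ j =>
        simp only [List.getD_cons_succ]
        rw [ih e off htail j (by simpa using hi)]
        omega
    · have hz : (endsOf e ls).countP (fun x => decide (x ≤ off)) = 0 := by
        rw [List.countP_eq_zero]
        intro x hx
        have := mem_endsOf_gt ls e x htail hx
        simp; omega
      rw [List.countP_cons_of_neg (by simpa using hle), hz]
      cases i with
      | zero =>
        simp only [List.getD_cons_zero]
        exact iff_of_false hle (by omega)
      | succ j =>
        simp only [List.getD_cons_succ]
        refine iff_of_false ?_ (by omega)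
        intro hcon
        have hjlen : j < (endsOf e ls).length := by simpa using hi
        have hmem : (endsOf e ls).getD j 0 ∈ endsOf e ls := by
          rw [List.getD_eq_getElem _ _ hjlen]; exact List.getElem_mem _
        have := mem_endsOf_gt ls e _ htail hmem
        omega

theorem bsearch_eq (ends : List Int) (off : Int) (k : Nat)
    (hP : ∀ i, i < ends.length → ((ends.getD i 0 ≤ off) ↔ i < k)) :
    ∀ n lo hi, hi - lo ≤ n → lo ≤ k → k ≤ hi → hi ≤ ends.length →
      bsearch ends off lo hi = k := by
  intro n
  induction n with
  | zero =>
    intro lo hi hn hlo hhi _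
    rw [bsearch]
    have : ¬ lo < hi := by omega
    simp only [this, dif_neg, not_false_iff]
    omega
  | succ m ih =>
    intro lo hi hn hlo hhi hlen
    rw [bsearch]
    by_cases hlt : lo < hi
    · simp only [hlt, dif_pos]
      set mid := (lo + hi) / 2 with hmid
      have hmidlt : mid < hi := by omega
      have hmidge : lo ≤ mid := by omega
      by_cases hc : ends.getD mid 0 ≤ off
      · simp only [hc, if_pos]
        have : mid < k := (hP mid (by omega)).mp hc
        exact ih (mid + 1) hi (by omega) (by omega) hhi hlen
      · simp only [hc, if_neg, not_false_iff]
        have : ¬ mid < k := fun h => hc ((hP mid (by omega)).mpr h)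
        exact ih lo mid (by omega) hlo (by omega) (by omega)
    · simp only [hlt, dif_neg, not_false_iff]
      omega

-- A's loop equals the countP-based selection over the cumulative ends.
theorem loopA_eq (ls : List (List Char)) : ∀ (c k off : Int),
    (∀ l ∈ ls, l ≠ []) →
    loopA ls k c off =
      (if (endsOf c ls).countP (fun e => decide (e ≤ off)) < ls.length then
         ((k + ((endsOf c ls).countP (fun e => decide (e ≤ off)) : Int)),
          off - (if (endsOf c ls).countP (fun e => decide (e ≤ off)) = 0 then c
                 else (endsOf c ls).getD ((endsOf c ls).countP (fun e => decide (e ≤ off)) - 1) 0))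
       else if off = (endsOf c ls).getLastD c then ((k + ls.length : Int), 0)
       else (-1, -1)) := by
  induction ls with
  | nil =>
    intro c k off _
    simp only [loopA, endsOf, List.countP_nil, List.length_nil, List.getLastD_nil,
      Nat.lt_irrefl, if_false]
    rcases eq_or_ne c off with h | h
    · subst h; simp
    · simp [h, Ne.symm h]
  | cons l ls ih =>
    intro c k off hne
    have htail : ∀ l' ∈ ls, l' ≠ [] := fun m hm => hne m (List.mem_cons_of_mem _ hm)
    simp only [loopA, endsOf]
    set e := c + (l.length : Int) with he
    by_cases hgt : e > off
    · have hle : ¬ e ≤ off := by omega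
      have hz : (endsOf e ls).countP (fun x => decide (x ≤ off)) = 0 := by
        rw [List.countP_eq_zero]
        intro x hx
        have := mem_endsOf_gt ls e x htail hx
        simp; omega
      rw [List.countP_cons_of_neg (by simpa using hle), hz]
      have hlen : 0 < (l :: ls).length := by simp
      rw [if_pos hgt, if_pos hlen]
      norm_num
    · have hle : e ≤ off := by omega
      rw [if_neg hgt]
      rw [ih e (k + 1) off htail]
      rw [List.countP_cons_of_pos (by simpa using hle)]
      set idx' := (endsOf e ls).countP (fun x => decide (x ≤ off)) with hidx
      simp only [List.length_cons, List.getLastD_cons, ← he]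
      by_cases hb : idx' < ls.length
      · have hb' : idx' + 1 < ls.length + 1 := by omega
        have hnz : idx' + 1 ≠ 0 := by omega
        simp only [hb, if_pos, hb', hnz, if_neg, not_false_iff]
        refine Prod.ext ?_ ?_
        · push_cast; ring
        · cases hj : idx' <;> simp [← he]
      · have hb' : ¬ idx' + 1 < ls.length + 1 := by omega
        rw [if_neg hb, if_neg hb']
        by_cases hoff : off = (endsOf e ls).getLastD e
        · rw [if_pos hoff, if_pos hoff]
          refine Prod.ext ?_ rfl
          push_cast; ring
        · rw [if_neg hoff, if_neg hoff]

-- last cumulative end = total length = the original character count.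
theorem endsOf_last_total (cs : List Char) :
    (endsOf 0 (splitKeep cs)).getLastD 0 = (cs.length : Int) := by
  rw [endsOf_getLastD]
  have h2 : ((splitKeep cs).map List.length).sum = cs.length := by
    rw [← List.length_flatten, splitKeep_flatten]
  rw [h2]; ring

theorem bsearch_eq_countP (cs : List Char) (off : Int) :
    bsearch (endsOf 0 (splitKeep cs)) off 0 (endsOf 0 (splitKeep cs)).length
      = (endsOf 0 (splitKeep cs)).countP (fun e => decide (e ≤ off)) := by
  set ends := endsOf 0 (splitKeep cs) with hends
  have hP := endsOf_le_iff (splitKeep cs) 0 off (splitKeep_ne_nil cs)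
  exact bsearch_eq ends off _ hP ends.length 0 ends.length (by omega) (by omega)
    List.countP_le_length le_rfl

-- ===== VERDICT (by name: the statement is the Claim_ definition above) =====
theorem byte_offset_to_position_spec : Claim_equal_byte_offset_to_position := by
  intro text off hdom hpre
  -- on Dom the UTF-8 byte length in Pre_ is the character count
  have hdomstr : pvDomStr text = true := by
    unfold Dom_byte_offset_to_position at hdom
    exact (Bool.and_eq_true _ _).mp hdom |>.1
  have hbl : byteLen text.toList = (text.toList.length : Int) :=
    byteLen_eq_length text.toList hdomstr
  rw [Pre_byte_offset_to_position, hbl] at hpre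
  unfold Spec_byte_offset_to_position
  simp only [byte_offset_to_position, byte_offset_to_position_alt]
  rw [loopA_eq (splitKeep text.toList) 0 0 off (splitKeep_ne_nil text.toList)]
  rw [bsearch_eq_countP text.toList off]
  set lines := splitKeep text.toList with hlines
  set ends := endsOf 0 lines with hends
  set idx := ends.countP (fun e => decide (e ≤ off)) with hidx
  simp only [zero_add]
  by_cases hlt : idx < lines.length
  · simp [hlt]
  · simp only [hlt, if_neg, not_false_iff]
    have htot : ends.getLastD 0 = (text.toList.length : Int) := endsOf_last_total text.toList
    have hoff : off = ends.getLastD 0 := by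
      rcases hpre with ⟨hne, hoflt⟩ | heq
      · exfalso
        have hcs : text.toList ≠ [] := by
          intro h
          apply hne
          have := congrArg String.ofList h
          simpa using this
        have hlnn : lines ≠ [] := by
          intro h
          have := splitKeep_flatten text.toList
          rw [← hlines, h] at this
          exact hcs this.symm
        have hennn : ends ≠ [] := by
          intro h
          have := endsOf_length lines 0
          rw [← hends, h] at this
          simp at this
          exact hlnn (List.length_eq_zero_iff.mp this.symm)
        have hlenidx : idx = ends.length := by
          have h1 : idx ≤ ends.length := List.countP_le_length
          have h2 : ends.length = lines.length := endsOf_length lines 0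
          omega
        have hall := (List.countP_eq_length).mp hlenidx
        have hmem : ends.getLast hennn ∈ ends := List.getLast_mem hennn
        have := hall _ hmem
        have hlast : ends.getLast hennn = ends.getLastD 0 := by
          rw [List.getLastD_eq_getLast?, List.getLast?_eq_some_getLast hennn]
          rfl
        rw [hlast, htot] at this
        simp only [decide_eq_true_eq] at this
        omega
      · rw [htot]; exact heq
    simp [hoff]
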